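-- pv_equiv track=rewrite | github.com/Fran-cois/MATILDA | fix_metanome_ultimate.py | fix_dependencies
-- ===== SOURCE A (Python) =====
-- def fix_dependencies(content):
--     """Corrige les problèmes de dépendances Java"""
--     # Supprimer les références aux dépendances problématiques
--     deps = ["mdms-tools", "mdms-metanome-client", "mdms-model"]
--     for dep in deps:
--         if dep in content:
--             # Trouver les lignes contenant la dépendance
--             lines = content.split("\n")
--             new_lines = []
--             for line in lines:
--                 if dep not in line:
--                     new_lines.append(line)
--             content = "\n".join(new_lines)
--
--     return content
-- ===== SOURCE B (Python) =====
-- def fix_dependencies(content):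
--     """Corrige les problèmes de dépendances Java"""
--     deps = ["mdms-tools", "mdms-metanome-client", "mdms-model"]
--     return "\n".join(
--         line for line in content.split("\n")
--         if not any(dep in line for dep in deps)
--     )
-- ===== Notes on version B (the rewrite author's own statement) =====
-- stated objective: simpler
-- what changed: Replaces A's outer per-dependency loop (each hit re-splitting the text, rebuilding the line list with an accumulator and re-joining) by a single split, one filter pass keeping lines that contain none of the three dependency strings, and one join.
import Mathlib
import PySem

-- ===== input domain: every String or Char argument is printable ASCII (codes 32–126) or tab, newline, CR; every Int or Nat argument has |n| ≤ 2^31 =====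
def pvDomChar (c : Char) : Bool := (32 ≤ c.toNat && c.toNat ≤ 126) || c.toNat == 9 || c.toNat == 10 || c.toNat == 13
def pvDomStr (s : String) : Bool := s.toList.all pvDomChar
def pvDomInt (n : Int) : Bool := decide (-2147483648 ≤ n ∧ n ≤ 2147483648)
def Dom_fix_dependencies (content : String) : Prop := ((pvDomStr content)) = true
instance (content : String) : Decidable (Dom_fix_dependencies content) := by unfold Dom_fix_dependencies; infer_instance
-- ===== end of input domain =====

-- B replaces A's per-dependency passes (each with its own split/join round-trip) by ONE
-- filter pass over the lines; objective: simpler. Equivalence proved on all inputs.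

-- ===== PORT A =====
-- deps = ["mdms-tools", "mdms-metanome-client", "mdms-model"] (shared by both ports)
def pvDeps : List (List Char) :=
  ["mdms-tools".toList, "mdms-metanome-client".toList, "mdms-model".toList]

def fix_dependencies (content : String) : String :=
  String.mk <| pvDeps.foldl (fun cs dep =>
    if PySem.Chars.isIn dep cs then
      let lines := PySem.Chars.splitOn cs ['\n']
      let newLines := lines.foldl (fun acc line =>
        if !PySem.Chars.isIn dep line then acc ++ [line] else acc) []
      PySem.Chars.join ['\n'] newLines
    else cs) content.toList

-- ===== PORT B =====
def fix_dependencies_alt (content : String) : String :=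
  String.mk <| PySem.Chars.join ['\n'] <|
    (PySem.Chars.splitOn content.toList ['\n']).filter
      (fun line => !pvDeps.any (fun dep => PySem.Chars.isIn dep line))

-- ===== PRECONDITION & SPEC =====
def Spec_fix_dependencies (content : String) (out : String) : Prop := out = fix_dependencies_alt content
instance (content : String) (out : String) : Decidable (Spec_fix_dependencies content out) := by unfold Spec_fix_dependencies; infer_instance

-- ===== CLAIM (what is proved, stated in full; the proofs are below) =====
def Claim_equal_fix_dependencies : Prop := ∀ (content : String), Dom_fix_dependencies content → Spec_fix_dependencies content (fix_dependencies content)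

-- ===== LEMMAS AND PROOFS =====

theorem splitOn_ne_nil (c : Char) (xs : List Char) : xs.splitOn c ≠ [] := by
  induction xs with
  | nil => simp [List.splitOn]
  | cons x xs ih =>
    by_cases h : x = c
    · simp [List.splitOn, List.splitOnP_cons, h]
    · simp only [List.splitOn, List.splitOnP_cons] at *
      simp [h]
      intro hx
      simp [hx] at ih

-- PySem's fueled splitOn on a one-character separator is Mathlib's List.splitOn
theorem go_eq (c : Char) (fuel : Nat) (l cur : List Char) (accs : List (List Char))
    (h : l.length < fuel) :
    PySem.Chars.splitOn.go [c] fuel l cur accs =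
      accs.reverse ++ (l.splitOn c).modifyHead (cur.reverse ++ ·) := by
  induction fuel generalizing l cur accs with
  | zero => omega
  | succ fuel ih =>
    cases l with
    | nil =>
      rw [PySem.Chars.splitOn.go]
      simp [List.splitOn]
      omega
    | cons x rest =>
      rw [PySem.Chars.splitOn.go]
      by_cases hx : x = c
      · subst hx
        simp only [List.isPrefixOf, BEq.rfl, Bool.true_and, if_pos,
          List.length_cons, List.length_nil, List.drop_succ_cons, List.drop_zero]
        rw [ih rest [] (cur.reverse :: accs) (by simpa using Nat.lt_of_succ_lt_succ h)]
        simp [List.splitOn, List.splitOnP_cons]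
        exact congrFun List.modifyHead_id _
      · have hpre : [c].isPrefixOf (x :: rest) = false := by
          simp [List.isPrefixOf]
          exact fun hh => absurd hh.symm hx
        simp only [hpre, Bool.false_eq_true, if_false]
        rw [ih rest (x :: cur) accs (by simpa using Nat.lt_of_succ_lt_succ h)]
        have e2 : (x :: rest).splitOn c = ((rest.splitOn c).modifyHead (x :: ·)) := by
          simp [List.splitOn, List.splitOnP_cons, hx]
        rw [e2, List.modifyHead_modifyHead]
        obtain ⟨hd, tl, e⟩ := List.exists_cons_of_ne_nil (splitOn_ne_nil c rest)
        simp [e]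

theorem pysplitOn_single (s : List Char) (c : Char) :
    PySem.Chars.splitOn s [c] = s.splitOn c := by
  rw [PySem.Chars.splitOn, go_eq c (s.length+1) s [] [] (by omega)]
  obtain ⟨hd, tl, e⟩ := List.exists_cons_of_ne_nil (splitOn_ne_nil c s)
  simp [e]

theorem splitOn_no_sep (c : Char) (xs : List Char) :
    ∀ l ∈ xs.splitOn c, c ∉ l := by
  induction xs with
  | nil => simp [List.splitOn]
  | cons x xs ih =>
    by_cases h : x = c
    · subst h
      have e1 : (x :: xs).splitOn x = [] :: xs.splitOn x := by
        simp [List.splitOn, List.splitOnP_cons]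
      rw [e1]
      intro l hl
      rcases List.mem_cons.mp hl with rfl | hl
      · simp
      · exact ih l hl
    · have e1 : (x :: xs).splitOn c = (xs.splitOn c).modifyHead (x :: ·) := by
        simp [List.splitOn, List.splitOnP_cons, h]
      obtain ⟨hd, tl, e⟩ := List.exists_cons_of_ne_nil (splitOn_ne_nil c xs)
      rw [e1, e, List.modifyHead_cons]
      intro l hl
      rcases List.mem_cons.mp hl with rfl | hl
      · have hhd := ih hd (by rw [e]; exact List.mem_cons_self)
        intro hc
        rcases List.mem_cons.mp hc with hc | hc
        · exact h hc.symm
        · exact hhd hc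
      · exact ih l (by rw [e]; exact List.mem_cons_of_mem _ hl)

theorem mem_infix_intercalate (sep : List Char) (ls : List (List Char)) :
    ∀ l ∈ ls, l <:+: sep.intercalate ls := by
  induction ls with
  | nil => simp
  | cons a rest ih =>
    cases rest with
    | nil =>
      intro l hl
      rcases List.mem_cons.mp hl with rfl | hl
      · simp [List.intercalate]
      · simp at hl
    | cons b rest' =>
      intro l hl
      rw [show List.intercalate sep (a :: b :: rest') = a ++ sep ++ List.intercalate sep (b :: rest') from PySem.Chars.join_cons_cons sep a b rest']
      rcases List.mem_cons.mp hl with rfl | hl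
      · exact ((l.prefix_append _).trans (List.prefix_append _ _)).isInfix
      · have h1 : l <:+: List.intercalate sep (b :: rest') := ih l hl
        have h2 : List.intercalate sep (b :: rest') <:+ a ++ sep ++ List.intercalate sep (b :: rest') := by
          exact List.suffix_append _ _
        exact h1.trans h2.isInfix

-- one iteration of A's outer loop always yields join('\n', filter(no-dep, split(cs,'\n')))
theorem stepA_eq (dep cs : List Char) :
    (if PySem.Chars.isIn dep cs then
       PySem.Chars.join ['\n'] ((PySem.Chars.splitOn cs ['\n']).foldl (fun acc line =>
         if !PySem.Chars.isIn dep line then acc ++ [line] else acc) [])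
     else cs)
    = PySem.Chars.join ['\n']
        ((PySem.Chars.splitOn cs ['\n']).filter (fun l => !PySem.Chars.isIn dep l)) := by
  rw [PySem.List.foldl_append_if_eq_filter]
  by_cases hin : PySem.Chars.isIn dep cs
  · simp [hin]
  · simp only [hin, Bool.false_eq_true, if_false]
    have hfalse : ∀ l ∈ PySem.Chars.splitOn cs ['\n'], PySem.Chars.isIn dep l = false := by
      intro l hl
      rw [show ∀ (a b : List Char), (PySem.Chars.isIn a b = false) = ¬ a <:+: b from fun a b => by rw [PySem.Chars.isIn_eq_false_iff]]
      intro hinf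
      have hl' : l <:+: cs := by
        rw [pysplitOn_single] at hl
        have := mem_infix_intercalate ['\n'] (cs.splitOn '\n') l hl
        rwa [List.intercalate_splitOn cs '\n'] at this
      exact (PySem.Chars.isIn_eq_false_iff (sub := dep) (s := cs)).mp (by simpa using hin) (hinf.trans hl')
    rw [List.filter_eq_self.mpr (fun l hl => by simp [hfalse l hl])]
    rw [pysplitOn_single]
    exact (List.intercalate_splitOn cs '\n').symm

-- re-splitting a join of newline-free lines and filtering keeps the join of the filtered lines
theorem join_filter_splitOn_join (ls : List (List Char)) (q : List Char → Bool)
    (h : ∀ l ∈ ls, '\n' ∉ l) (hq : q [] = true) :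
    PySem.Chars.join ['\n'] ((PySem.Chars.splitOn (PySem.Chars.join ['\n'] ls) ['\n']).filter q)
      = PySem.Chars.join ['\n'] (ls.filter q) := by
  rcases eq_or_ne ls [] with rfl | hne
  · simp [PySem.Chars.join, List.intercalate, pysplitOn_single, List.splitOn, hq]
  · rw [pysplitOn_single]
    have e : List.splitOn '\n' (PySem.Chars.join ['\n'] ls) = ls := by
      show List.splitOn '\n' (['\n'].intercalate ls) = ls
      exact List.splitOn_intercalate ls '\n' h hne
    rw [e]

-- ===== VERDICT (by name: the statement is the Claim_ definition above) =====
theorem fix_dependencies_spec : Claim_equal_fix_dependencies := by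
  intro content _
  unfold Spec_fix_dependencies fix_dependencies fix_dependencies_alt
  set cs := content.toList with hcs
  congr 1
  simp only [pvDeps, List.foldl_cons, List.foldl_nil]
  rw [stepA_eq, stepA_eq, stepA_eq]
  have hns : ∀ q : List Char → Bool, ∀ l ∈ (PySem.Chars.splitOn cs ['\n']).filter q, '\n' ∉ l := by
    intro q l hl
    have := splitOn_no_sep '\n' cs l (by
      have := List.mem_of_mem_filter hl
      rwa [pysplitOn_single] at this)
    exact this
  rw [join_filter_splitOn_join _ _ (hns _) (by decide)]
  rw [List.filter_filter]
  rw [join_filter_splitOn_join _ _ (hns _) (by decide)]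
  rw [List.filter_filter]
  apply congrArg
  apply List.filter_congr
  intro x _
  simp only [List.any_cons, List.any_nil, Bool.or_false]
  cases PySem.Chars.isIn "mdms-tools".toList x <;>
    cases PySem.Chars.isIn "mdms-metanome-client".toList x <;>
      cases PySem.Chars.isIn "mdms-model".toList x <;> rfl
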